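-- pv_equiv track=rewrite | github.com/Aharvey35/netassist | modules/meraki/actions/svis.py | _find_net
-- ===== SOURCE A (Python) =====
-- from typing import List, Dict, Any, Tuple, Set
--
-- def _find_net(nets: List[Dict[str, Any]], q: str):
--     ql = q.lower()
--     for n in nets:
--         if str(n.get("id","")).lower() == ql or str(n.get("name","")).lower() == ql:
--             return n
--     for n in nets:
--         if ql in str(n.get("name","")).lower():
--             return n
--     return None
-- ===== SOURCE B (Python) =====
-- def _find_net(nets, q):
--     ql = q.lower()
--     fallback = None
--     for n in nets:
--         idv = str(n.get("id", "")).lower()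
--         namev = str(n.get("name", "")).lower()
--         if idv == ql or namev == ql:
--             return n
--         if fallback is None and ql in namev:
--             fallback = n
--     return fallback
-- ===== Notes on version B (the rewrite author's own statement) =====
-- stated objective: alternative
-- what changed: Replaced A's two full scans (first for exact id/name matches, then for substring matches) by a single pass that returns on the first exact match and records only the first substring match in a fallback accumulator.
import Mathlib
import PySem

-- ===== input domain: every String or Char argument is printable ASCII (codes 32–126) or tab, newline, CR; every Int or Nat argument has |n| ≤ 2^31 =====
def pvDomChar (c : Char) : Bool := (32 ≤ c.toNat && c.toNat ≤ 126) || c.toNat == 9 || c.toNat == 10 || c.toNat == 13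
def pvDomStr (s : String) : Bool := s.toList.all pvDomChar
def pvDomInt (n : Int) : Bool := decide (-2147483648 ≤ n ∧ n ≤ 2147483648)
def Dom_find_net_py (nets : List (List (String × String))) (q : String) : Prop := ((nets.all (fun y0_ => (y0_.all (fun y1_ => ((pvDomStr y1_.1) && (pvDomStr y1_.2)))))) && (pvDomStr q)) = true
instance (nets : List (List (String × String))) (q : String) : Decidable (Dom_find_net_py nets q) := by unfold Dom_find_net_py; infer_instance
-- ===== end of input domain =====

-- B replaces the two scans (exact match, then substring match) by one pass with a fallback accumulator; same result, proved equal.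



-- ===== PORT A =====
-- A: two scans — first exact id/name match, then first substring-of-name match.
def pvIdLower (n : List (String × String)) : String :=
  PySem.Str.lower (PySem.Dict.getD (PySem.Dict.mk n) "id" "")

def pvNameLower (n : List (String × String)) : String :=
  PySem.Str.lower (PySem.Dict.getD (PySem.Dict.mk n) "name" "")

def pvExactLoop (ql : String) : List (List (String × String)) → Option (List (String × String))
  | [] => none
  | n :: t => if pvIdLower n == ql || pvNameLower n == ql then some n else pvExactLoop ql t

def pvSubLoop (ql : String) : List (List (String × String)) → Option (List (String × String))
  | [] => none
  | n :: t => if PySem.Str.isIn ql (pvNameLower n) then some n else pvSubLoop ql t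

def find_net_py (nets : List (List (String × String))) (q : String) : Option (List (String × String)) :=
  let ql := PySem.Str.lower q
  match pvExactLoop ql nets with
  | some n => some n
  | none => pvSubLoop ql nets

-- ===== PORT B =====
-- B: one pass; return on exact match, record the first substring match as fallback.
def pvAltLoop (ql : String) : List (List (String × String)) → Option (List (String × String)) → Option (List (String × String))
  | [], fb => fb
  | n :: t, fb =>
    if pvIdLower n == ql || pvNameLower n == ql then some n
    else pvAltLoop ql t (if fb.isNone && PySem.Str.isIn ql (pvNameLower n) then some n else fb)

def find_net_py_alt (nets : List (List (String × String))) (q : String) : Option (List (String × String)) :=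
  pvAltLoop (PySem.Str.lower q) nets none

-- ===== PRECONDITION & SPEC =====
def Spec_find_net_py (nets : List (List (String × String))) (q : String) (out : Option (List (String × String))) : Prop := out = find_net_py_alt nets q
instance (nets : List (List (String × String))) (q : String) (out : Option (List (String × String))) : Decidable (Spec_find_net_py nets q out) := by unfold Spec_find_net_py; infer_instance

-- ===== CLAIM (what is proved, stated in full; the proofs are below) =====
def Claim_equal_find_net_py : Prop := ∀ (nets : List (List (String × String))) (q : String), Dom_find_net_py nets q → Spec_find_net_py nets q (find_net_py nets q)


-- ===== LEMMAS AND PROOFS =====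
theorem pvAltLoop_eq (ql : String) (l : List (List (String × String))) :
    ∀ fb, pvAltLoop ql l fb = (pvExactLoop ql l).or (fb.or (pvSubLoop ql l)) := by
  induction l with
  | nil => intro fb; cases fb <;> simp [pvAltLoop, pvExactLoop, pvSubLoop]
  | cons n t ih =>
    intro fb
    by_cases he : (pvIdLower n == ql || pvNameLower n == ql) = true
    · simp [pvAltLoop, pvExactLoop, he]
    · by_cases hs : PySem.Chars.isIn ql.toList (pvNameLower n).toList = true <;>
        cases fb <;>
        simp [pvAltLoop, pvExactLoop, pvSubLoop, he, hs, ih]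

-- ===== VERDICT (by name: the statement is the Claim_ definition above) =====
theorem find_net_py_spec : Claim_equal_find_net_py := by
  intro nets q _
  unfold Spec_find_net_py find_net_py find_net_py_alt
  rw [pvAltLoop_eq]
  cases h : pvExactLoop (PySem.Str.lower q) nets <;> simp [h]
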